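-- pv_equiv track=rewrite | github.com/nicolajack/BUCS111 | ps3/ps3pr2.py | abs_list_rec
-- ===== SOURCE A (Python) =====
-- def abs_list_rec(values):
--     """takes as input a list of numbers called values, and that uses recursion to create and return a list containing the absolute values of the numbers in values"""
--     if values == []:
--         return []
--     else:
--         rest_abs = abs_list_rec(values[1:])
--         if values[0] >= 0:
--             return [values[0]] + rest_abs
--         else:
--             return [-values[0]] + rest_abs
-- ===== SOURCE B (Python) =====
-- def abs_list_rec(values):
--     """takes as input a list of numbers called values, and that uses recursion to create and return a list containing the absolute values of the numbers in values"""
--     result = []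
--     for v in values:
--         if v >= 0:
--             result.append(v)
--         else:
--             result.append(-v)
--     return result
-- ===== Notes on version B (the rewrite author's own statement) =====
-- stated objective: simpler
-- what changed: Replaces head/tail recursion building the list by repeated [x]+rest concatenation (plus a values[1:] slice per step) with a single forward loop appending abs of each element to an accumulator.
import Mathlib
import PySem

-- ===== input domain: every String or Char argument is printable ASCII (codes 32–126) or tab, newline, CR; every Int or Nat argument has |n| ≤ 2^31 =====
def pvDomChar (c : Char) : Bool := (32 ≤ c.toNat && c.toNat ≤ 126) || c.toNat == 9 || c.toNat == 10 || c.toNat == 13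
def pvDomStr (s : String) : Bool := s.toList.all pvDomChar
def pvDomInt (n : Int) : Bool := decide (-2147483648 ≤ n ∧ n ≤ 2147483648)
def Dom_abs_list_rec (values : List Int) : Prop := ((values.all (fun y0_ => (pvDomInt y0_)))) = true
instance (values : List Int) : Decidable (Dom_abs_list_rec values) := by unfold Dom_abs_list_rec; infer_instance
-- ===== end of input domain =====

-- B replaces A's recursion over the tail with a forward loop appending to an accumulator (simpler, linear-shaped build instead of repeated cons-concatenation).

-- ===== PORT A =====
def abs_list_rec (values : List Int) : List Int :=
  match values with
  | [] => []
  | v :: rest =>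
    let rest_abs := abs_list_rec rest
    if v ≥ 0 then [v] ++ rest_abs else [-v] ++ rest_abs

-- ===== PORT B =====
def abs_list_rec_alt (values : List Int) : List Int :=
  values.foldl (fun result v => if v ≥ 0 then result ++ [v] else result ++ [-v]) []

-- ===== PRECONDITION & SPEC =====
def Spec_abs_list_rec (values : List Int) (out : List Int) : Prop := out = abs_list_rec_alt values
instance (values : List Int) (out : List Int) : Decidable (Spec_abs_list_rec values out) := by unfold Spec_abs_list_rec; infer_instance

-- ===== CLAIM (what is proved, stated in full; the proofs are below) =====
def Claim_equal_abs_list_rec : Prop := ∀ (values : List Int), Dom_abs_list_rec values → Spec_abs_list_rec values (abs_list_rec values)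

-- ===== LEMMAS AND PROOFS =====
theorem abs_list_rec_alt_acc (values : List Int) (acc : List Int) :
    values.foldl (fun result v => if v ≥ 0 then result ++ [v] else result ++ [-v]) acc
      = acc ++ abs_list_rec values := by
  induction values generalizing acc with
  | nil => simp [abs_list_rec]
  | cons v rest ih =>
    simp only [List.foldl_cons, abs_list_rec, ih]
    split <;> simp

-- ===== VERDICT (by name: the statement is the Claim_ definition above) =====
theorem abs_list_rec_spec : Claim_equal_abs_list_rec := by
  intro values _
  unfold Spec_abs_list_rec abs_list_rec_alt
  simp [abs_list_rec_alt_acc]
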